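-- pv_equiv track=rewrite | github.com/nullco/advent_of_code | 2024/5/solution.py | fix_unordered_pages
-- ===== SOURCE A (Python) =====
-- def fix_unordered_pages(ordering_rules, unordered_pages):
--     result = []
--     for p in unordered_pages:
--         applying_rules = [r for r in ordering_rules if rule_applies(r, p)]
--         pages_after = get_pages_after(p, applying_rules)
--         srs = sorted(pages_after.items(), key=lambda item: len(item[1]))
--         result.append([k for k, _ in srs])
--     return result
--
-- def get_pages_after(pages, rules):
--     res = {p: set() for p in pages}
--     for rb, ra in rules:
--         res[ra].add(rb)
--     return res
--
-- def rule_applies(rule, pages):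
--     pb, pa = rule
--     if pb in pages and pa in pages:
--         return True
--     return False
-- ===== SOURCE B (Python) =====
-- def fix_unordered_pages(ordering_rules, unordered_pages):
--     result = []
--     for p in unordered_pages:
--         pages = list(dict.fromkeys(p))
--         pset = set(p)
--         counts = [len({rb for rb, ra in ordering_rules if ra == q and rb in pset})
--                   for q in pages]
--         nbuckets = 0
--         for c in counts:
--             nbuckets = max(nbuckets, c + 1)
--         buckets = [[] for _ in range(nbuckets)]
--         for q, c in zip(pages, counts):
--             buckets[c] = buckets[c] + [q]
--         result.append([q for b in buckets for q in b])
--     return result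
-- ===== Notes on version B (the rewrite author's own statement) =====
-- stated objective: alternative
-- what changed: Replaces A's dict-of-predecessor-sets plus stable comparison sort (sorted by set size) with a per-page distinct-predecessor count distributed into count-indexed buckets (a stable counting/bucket sort) concatenated in count order.
import Mathlib
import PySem

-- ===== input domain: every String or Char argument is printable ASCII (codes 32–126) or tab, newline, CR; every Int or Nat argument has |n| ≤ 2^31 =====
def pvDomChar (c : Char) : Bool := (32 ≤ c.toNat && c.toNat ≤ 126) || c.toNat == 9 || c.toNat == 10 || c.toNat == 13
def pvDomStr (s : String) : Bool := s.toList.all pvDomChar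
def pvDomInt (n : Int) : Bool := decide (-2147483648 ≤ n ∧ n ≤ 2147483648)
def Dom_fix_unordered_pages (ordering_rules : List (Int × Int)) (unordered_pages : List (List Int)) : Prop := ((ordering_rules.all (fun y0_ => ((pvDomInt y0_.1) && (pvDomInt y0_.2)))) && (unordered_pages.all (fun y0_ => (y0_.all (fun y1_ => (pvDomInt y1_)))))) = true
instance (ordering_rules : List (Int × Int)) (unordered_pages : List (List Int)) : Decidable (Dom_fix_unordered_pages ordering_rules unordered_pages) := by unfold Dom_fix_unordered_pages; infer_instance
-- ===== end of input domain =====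

-- B replaces A's dict-of-predecessor-sets plus stable comparison sort by a per-page distinct-predecessor
-- count distributed into count-indexed buckets (a bucket/counting sort); objective: alternative.

-- ===== PORT A =====
def ruleApplies (rule : Int × Int) (pages : List Int) : Bool :=
  if rule.1 ∈ pages ∧ rule.2 ∈ pages then true else false

-- res[ra].add(rb): at every call site ra is a key of res (rule_applies holds), where Dict.modify is exact
def getPagesAfter (pages : List Int) (rules : List (Int × Int)) : PySem.Dict Int (PySem.Set Int) :=
  let res := pages.foldl (fun d q => d.insert q PySem.Set.empty) PySem.Dict.empty
  rules.foldl (fun d r => d.modify r.2 PySem.Set.empty (fun s => PySem.Set.add s r.1)) res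

def fix_unordered_pages (ordering_rules : List (Int × Int)) (unordered_pages : List (List Int)) : List (List Int) :=
  unordered_pages.foldl (fun result p =>
    let applying_rules := ordering_rules.filter (fun r => ruleApplies r p)
    let pages_after := getPagesAfter p applying_rules
    let srs := PySem.List.sorted pages_after.items (fun item => PySem.Set.len item.2)
    result ++ [srs.map (fun kv => kv.1)]) []

-- ===== PORT B =====
def fix_unordered_pages_alt (ordering_rules : List (Int × Int)) (unordered_pages : List (List Int)) : List (List Int) :=
  unordered_pages.foldl (fun result p =>
    let pages := PySem.List.dedup p
    let pset := PySem.Set.ofList p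
    let counts := pages.map (fun q =>
      PySem.Set.len (PySem.Set.ofList
        ((ordering_rules.filter (fun r => r.2 == q && PySem.Set.contains pset r.1)).map (fun r => r.1))))
    let nbuckets := counts.foldl (fun n c => max n (c + 1)) (0 : Int)
    let buckets0 : List (List Int) := (PySem.List.pyRange 0 nbuckets 1).map (fun _ => [])
    let buckets := (pages.zip counts).foldl
      (fun bs qc => PySem.List.pySetD bs qc.2 (PySem.List.pyGetD bs qc.2 [] ++ [qc.1])) buckets0
    result ++ [buckets.flatMap (fun b => b)]) []

-- ===== PRECONDITION & SPEC =====
def Spec_fix_unordered_pages (ordering_rules : List (Int × Int)) (unordered_pages : List (List Int)) (out : List (List Int)) : Prop := out = fix_unordered_pages_alt ordering_rules unordered_pages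
instance (ordering_rules : List (Int × Int)) (unordered_pages : List (List Int)) (out : List (List Int)) : Decidable (Spec_fix_unordered_pages ordering_rules unordered_pages out) := by unfold Spec_fix_unordered_pages; infer_instance

-- ===== CLAIM (what is proved, stated in full; the proofs are below) =====
def Claim_equal_fix_unordered_pages : Prop := ∀ (ordering_rules : List (Int × Int)) (unordered_pages : List (List Int)), Dom_fix_unordered_pages ordering_rules unordered_pages → Spec_fix_unordered_pages ordering_rules unordered_pages (fix_unordered_pages ordering_rules unordered_pages)

-- ===== LEMMAS AND PROOFS =====

theorem ruleApplies_eq (r : Int × Int) (p : List Int) :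
    ruleApplies r p = (decide (r.1 ∈ p) && decide (r.2 ∈ p)) := by
  unfold ruleApplies
  by_cases h : r.1 ∈ p ∧ r.2 ∈ p
  · simp [h.1, h.2]
  · rw [if_neg h]
    rcases not_and_or.mp h with h1 | h1 <;> simp [h1]

theorem contains_ofList_eq (p : List Int) (x : Int) :
    PySem.Set.contains (PySem.Set.ofList p) x = decide (x ∈ p) := by
  cases hc : PySem.Set.contains (PySem.Set.ofList p) x
  · have : x ∉ p := fun hm => by
      rw [(PySem.Set.contains_iff _ _).mpr ((PySem.Set.mem_ofList _ _).mpr hm)] at hc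
      cases hc
    simp [this]
  · have : x ∈ p := (PySem.Set.mem_ofList _ _).mp ((PySem.Set.contains_iff _ _).mp hc)
    simp [this]

theorem pred_lists (ordering_rules : List (Int × Int)) (p : List Int) (q : Int) (hq : q ∈ p) :
    (ordering_rules.filter (fun r => ruleApplies r p)).filter (fun r => r.2 == q)
    = ordering_rules.filter (fun r => r.2 == q && PySem.Set.contains (PySem.Set.ofList p) r.1) := by
  rw [List.filter_filter]
  apply List.filter_congr
  intro r _
  rw [ruleApplies_eq, contains_ofList_eq]
  by_cases h2 : r.2 = q
  · subst h2
    simp [hq]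
  · have hb : (r.2 == q) = false := by simp [h2]
    simp [hb]

theorem zip_map_self {α β : Type} (l : List α) (f : α → β) :
    l.zip (l.map f) = l.map (fun a => (a, f a)) := by
  induction l with
  | nil => rfl
  | cons x xs ih => simp [ih]


theorem insertBy_split {α : Type} (bf : α → α → Bool) (x : α) (L2 : List α)
    (h2 : ∀ y ∈ L2, bf x y = true) :
    ∀ L1 : List α, (∀ y ∈ L1, bf x y = false) →
      PySem.List.insertBy bf x (L1 ++ L2) = L1 ++ x :: L2 := by
  intro L1
  induction L1 with
  | nil =>
    intro _
    cases L2 with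
    | nil => rfl
    | cons y ys => simp [PySem.List.insertBy, h2 y (by simp)]
  | cons y ys ih =>
    intro h1
    simp only [List.cons_append, PySem.List.insertBy, h1 y (by simp)]
    simp only [Bool.false_eq_true, if_false]
    rw [ih (fun z hz => h1 z (by simp [hz]))]

theorem sorted_buckets {α : Type} (xs : List α) (key : α → Int) (n : Nat)
    (h : ∀ x ∈ xs, ∃ k : Nat, key x = (k : Int) ∧ k < n) :
    PySem.List.sorted xs key =
      List.flatMap (fun (c : Nat) => xs.filter (fun x => key x == (c : Int))) (List.range n) := by
  induction xs using List.reverseRecOn with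
  | nil => simp [PySem.List.sorted_eq_foldl_insertBy]
  | append_singleton xs x ih =>
    rw [PySem.List.sorted_eq_foldl_insertBy] at *
    rw [List.foldl_append, List.foldl_cons, List.foldl_nil]
    rw [ih (fun y hy => h y (by simp [hy]))]
    obtain ⟨kx, hkx, hkn⟩ := h x (by simp)
    have hsplit : n = (kx + 1) + (n - (kx + 1)) := by omega
    rw [hsplit, List.range_add, List.flatMap_append, List.flatMap_append]
    rw [insertBy_split _ x _ ?hL2 _ ?hL1]
    case hL2 =>
      intro y hy
      simp only [List.mem_flatMap, List.mem_map, List.mem_filter, List.mem_range] at hy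
      obtain ⟨c, ⟨j, hj, rfl⟩, _, hkey⟩ := hy
      simp only [beq_iff_eq] at hkey
      simp only [decide_eq_true_eq, hkx, hkey]
      push_cast; omega
    case hL1 =>
      intro y hy
      simp only [List.mem_flatMap, List.mem_filter, List.mem_range] at hy
      obtain ⟨c, hc, _, hkey⟩ := hy
      simp only [beq_iff_eq] at hkey
      simp only [decide_eq_false_iff_not, hkx, hkey, not_lt]
      omega
    -- remaining: bucket lists equality
    have upper : List.flatMap (fun (c : Nat) => (xs ++ [x]).filter (fun y => key y == (c : Int)))
        (List.map (fun j => kx + 1 + j) (List.range (n - (kx + 1))))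
        = List.flatMap (fun (c : Nat) => xs.filter (fun y => key y == (c : Int)))
        (List.map (fun j => kx + 1 + j) (List.range (n - (kx + 1)))) := by
      apply List.flatMap_congr
      intro c hc
      simp only [List.mem_map, List.mem_range] at hc
      obtain ⟨j, hj, rfl⟩ := hc
      rw [List.filter_append]
      have : ([x].filter (fun y => key y == ((kx + 1 + j : Nat) : Int))) = [] := by
        simp [hkx]; omega
      rw [this, List.append_nil]
    have lower : List.flatMap (fun (c : Nat) => (xs ++ [x]).filter (fun y => key y == (c : Int)))
        (List.range (kx + 1))
        = (List.flatMap (fun (c : Nat) => xs.filter (fun y => key y == (c : Int)))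
            (List.range (kx + 1))) ++ [x] := by
      rw [List.range_succ, List.flatMap_append, List.flatMap_append,
        List.flatMap_singleton, List.flatMap_singleton]
      have hmid : (xs ++ [x]).filter (fun y => key y == ((kx : Nat) : Int))
          = xs.filter (fun y => key y == ((kx : Nat) : Int)) ++ [x] := by
        rw [List.filter_append]
        congr 1
        simp [hkx]
      rw [hmid]
      have hlo : List.flatMap (fun (c : Nat) => (xs ++ [x]).filter (fun y => key y == (c : Int)))
          (List.range kx)
          = List.flatMap (fun (c : Nat) => xs.filter (fun y => key y == (c : Int)))
          (List.range kx) := by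
        apply List.flatMap_congr
        intro c hc
        simp only [List.mem_range] at hc
        rw [List.filter_append]
        have : ([x].filter (fun y => key y == ((c : Nat) : Int))) = [] := by
          simp [hkx]; omega
        rw [this, List.append_nil]
      rw [hlo, List.append_assoc]
    rw [upper, lower]
    simp


theorem d0_getD (p : List Int) :
    ∀ (d : PySem.Dict Int (PySem.Set Int)), (∀ q, d.getD q PySem.Set.empty = PySem.Set.empty) →
    ∀ q, (p.foldl (fun d q => d.insert q PySem.Set.empty) d).getD q PySem.Set.empty = PySem.Set.empty := by
  induction p with
  | nil => intro d h q; simpa using h q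
  | cons x xs ih =>
    intro d h q
    rw [List.foldl_cons]
    apply ih
    intro q'
    rw [PySem.Dict.getD_insert]
    split
    · rfl
    · exact h q'

theorem modify_loop_getD (l : List (Int × Int)) :
    ∀ (d : PySem.Dict Int (PySem.Set Int)) (c : Int),
    (l.foldl (fun d r => d.modify r.2 PySem.Set.empty (fun s => PySem.Set.add s r.1)) d).getD c PySem.Set.empty
    = PySem.Set.update (d.getD c PySem.Set.empty) ((l.filter (fun r => r.2 == c)).map (fun r => r.1)) := by
  induction l with
  | nil => intro d c; simp [PySem.Set.update]
  | cons r rs ih =>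
    intro d c
    rw [List.foldl_cons, ih]
    rw [List.filter_cons]
    by_cases hc : r.2 = c
    · simp only [hc, beq_self_eq_true, if_true, List.map_cons, PySem.Set.update_cons]
      rw [PySem.Dict.getD_modify]
      simp
    · have : (r.2 == c) = false := by simp [hc]
      simp only [this]
      rw [PySem.Dict.getD_modify]
      simp [Ne.symm hc]

theorem items_getPagesAfter (p : List Int) (rules : List (Int × Int))
    (hr : ∀ r ∈ rules, r.2 ∈ p) :
    (getPagesAfter p rules).items
    = (PySem.List.dedup p).map (fun q =>
        (q, PySem.Set.ofList ((rules.filter (fun r => r.2 == q)).map (fun r => r.1)))) := by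
  unfold getPagesAfter
  set d0 := p.foldl (fun d q => d.insert q PySem.Set.empty) PySem.Dict.empty with hd0
  have hkeys0 : d0.keys = PySem.List.dedup p := by
    rw [hd0, PySem.Dict.keys_foldl_insert]
    simp [PySem.Dict.keys_empty, PySem.Set.update_nil_left]
  have hnd0 : d0.keys.Nodup := by rw [hkeys0]; exact PySem.List.nodup_dedup p
  set df := rules.foldl (fun d r => d.modify r.2 PySem.Set.empty (fun s => PySem.Set.add s r.1)) d0 with hdf
  have hkeysf : df.keys = PySem.List.dedup p := by
    rw [hdf, PySem.Dict.keys_foldl_modify_key rules (fun r => r.2) PySem.Set.empty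
      (fun _ r s => PySem.Set.add s r.1) d0]
    rw [hkeys0, PySem.Set.update_eq_append_filter]
    have : (PySem.Set.ofList (rules.map fun r => r.2)).filter
        (fun y => !(PySem.Set.contains (PySem.List.dedup p) y)) = [] := by
      rw [List.filter_eq_nil_iff]
      intro y hy
      have : y ∈ p := by
        have := (PySem.Set.mem_ofList _ _).mp hy
        simp only [List.mem_map] at this
        obtain ⟨r, hrm, rfl⟩ := this
        exact hr r hrm
      simp [this]
    rw [this, List.append_nil]
  have hndf : df.keys.Nodup := by rw [hkeysf]; exact PySem.List.nodup_dedup p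
  rw [PySem.Dict.items_eq_map_keys df hndf PySem.Set.empty, hkeysf]
  apply List.map_congr_left
  intro q hq
  rw [hdf, modify_loop_getD]
  rw [d0_getD p PySem.Dict.empty (fun q => by simp) q]
  rw [show (PySem.Set.empty : PySem.Set Int) = [] from rfl, PySem.Set.update_nil_left]


theorem foldl_max_ge (l : List Int) : ∀ (a : Int),
    a ≤ l.foldl (fun n c => max n (c + 1)) a ∧
    ∀ c ∈ l, c + 1 ≤ l.foldl (fun n c => max n (c + 1)) a := by
  induction l with
  | nil => intro a; simp
  | cons x xs ih =>
    intro a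
    rw [List.foldl_cons]
    obtain ⟨h1, h2⟩ := ih (max a (x + 1))
    refine ⟨le_trans (le_max_left _ _) h1, ?_⟩
    intro c hc
    rcases List.mem_cons.mp hc with rfl | hm
    · exact le_trans (le_max_right _ _) h1
    · exact h2 c hm

theorem buckets_foldl (pairs : List (Int × Int)) :
    ∀ (B0 : List (List Int)),
    (∀ qc ∈ pairs, ∃ k : Nat, qc.2 = (k : Int) ∧ k < B0.length) →
    pairs.foldl (fun bs qc => PySem.List.pySetD bs qc.2 (PySem.List.pyGetD bs qc.2 [] ++ [qc.1])) B0
    = (List.range B0.length).map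
        (fun c => B0.getD c [] ++ (pairs.filter (fun qc => qc.2 == (c : Int))).map (fun qc => qc.1)) := by
  induction pairs with
  | nil =>
    intro B0 _
    simp only [List.foldl_nil, List.filter_nil, List.map_nil, List.append_nil]
    apply List.ext_getElem
    · simp
    · intro i h1 h2
      simp [List.getD_eq_getElem?_getD, h1]
  | cons qc rest ih =>
    intro B0 h
    obtain ⟨k0, hk0, hk0len⟩ := h qc (by simp)
    rw [List.foldl_cons]
    set B1 := PySem.List.pySetD B0 qc.2 (PySem.List.pyGetD B0 qc.2 [] ++ [qc.1]) with hB1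
    have hB1eq : B1 = B0.set k0 (B0.getD k0 [] ++ [qc.1]) := by
      rw [hB1, hk0]
      simp [PySem.List.pySetD_natCast, PySem.List.pyGetD_natCast]
    have hlen : B1.length = B0.length := by rw [hB1eq]; simp
    rw [ih B1 (fun qc' hm => by
      obtain ⟨k, hk, hkl⟩ := h qc' (by simp [hm]); exact ⟨k, hk, by omega⟩)]
    rw [hlen]
    apply List.map_congr_left
    intro c hc
    simp only [List.mem_range] at hc
    have hget : B1.getD c [] = if c = k0 then B0.getD k0 [] ++ [qc.1] else B0.getD c [] := by
      rw [hB1eq]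
      by_cases hck : c = k0
      · simp [hck, List.getD_eq_getElem?_getD, hk0len]
      · simp only [List.getD_eq_getElem?_getD, List.getElem?_set]
        rw [if_neg (fun h => hck h.symm), if_neg hck]
    rw [List.filter_cons]
    by_cases hck : c = k0
    · subst hck
      have : (qc.2 == ((c : Nat) : Int)) = true := by simp [hk0]
      simp only [this, if_true, List.map_cons]
      rw [hget]
      simp
    · have : (qc.2 == ((c : Nat) : Int)) = false := by
        simp [hk0]; omega
      simp only [this, Bool.false_eq_true, if_false]
      rw [hget, if_neg hck]

theorem main_per_page (ordering_rules : List (Int × Int)) (p : List Int) :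
    (PySem.List.sorted (getPagesAfter p (ordering_rules.filter (fun r => ruleApplies r p))).items
      (fun item => PySem.Set.len item.2)).map (fun kv => kv.1) =
    (let pages := PySem.List.dedup p
     let pset := PySem.Set.ofList p
     let counts := pages.map (fun q =>
       PySem.Set.len (PySem.Set.ofList
         ((ordering_rules.filter (fun r => r.2 == q && PySem.Set.contains pset r.1)).map (fun r => r.1))))
     let nbuckets := counts.foldl (fun n c => max n (c + 1)) (0 : Int)
     let buckets0 : List (List Int) := (PySem.List.pyRange 0 nbuckets 1).map (fun _ => [])
     let buckets := (pages.zip counts).foldl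
       (fun bs qc => PySem.List.pySetD bs qc.2 (PySem.List.pyGetD bs qc.2 [] ++ [qc.1])) buckets0
     buckets.flatMap (fun b => b)) := by
  dsimp only
  -- names
  set pages := PySem.List.dedup p with hpages
  set f : Int → PySem.Set Int := fun q =>
    PySem.Set.ofList ((ordering_rules.filter
      (fun r => r.2 == q && PySem.Set.contains (PySem.Set.ofList p) r.1)).map (fun r => r.1)) with hf
  -- A-side items
  have hitems : (getPagesAfter p (ordering_rules.filter (fun r => ruleApplies r p))).items
      = pages.map (fun q => (q, f q)) := by
    rw [items_getPagesAfter p _ (fun r hr => by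
      rw [List.mem_filter, ruleApplies_eq] at hr
      exact of_decide_eq_true (Bool.and_elim_right hr.2))]
    apply List.map_congr_left
    intro q hq
    have hqp : q ∈ p := (PySem.List.mem_dedup _ _).mp hq
    rw [pred_lists ordering_rules p q hqp, hf]
  rw [hitems]
  -- counts list
  set counts := pages.map (fun q => PySem.Set.len (f q)) with hcounts
  set nb := counts.foldl (fun n c => max n (c + 1)) (0 : Int) with hnb
  have hnb0 : (0:Int) ≤ nb := (foldl_max_ge counts 0).1
  have hbound : ∀ q ∈ pages, ((f q).length : Int) + 1 ≤ nb := by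
    intro q hq
    have hmem : (PySem.Set.len (f q)) ∈ counts := by
      rw [hcounts]; exact List.mem_map.mpr ⟨q, hq, rfl⟩
    have := (foldl_max_ge counts 0).2 _ hmem
    simpa [PySem.Set.len] using this
  -- A side to buckets
  rw [sorted_buckets (pages.map (fun q => (q, f q))) _ nb.toNat ?hkey]
  case hkey =>
    intro it hit
    obtain ⟨q, hq, rfl⟩ := List.mem_map.mp hit
    refine ⟨(f q).length, by simp [PySem.Set.len], ?_⟩
    have := hbound q hq
    omega
  -- B side buckets
  rw [zip_map_self pages (fun q => PySem.Set.len (f q))]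
  have hB0len : ((PySem.List.pyRange 0 nb 1).map (fun _ => ([] : List Int))).length = nb.toNat := by
    rw [List.length_map, PySem.List.length_pyRange_one]
    omega
  rw [buckets_foldl _ _ ?hin]
  case hin =>
    intro qc hqc
    obtain ⟨q, hq, rfl⟩ := List.mem_map.mp hqc
    refine ⟨(f q).length, by simp [PySem.Set.len], ?_⟩
    have := hbound q hq
    omega
  rw [hB0len]
  have hgetD : ∀ (c : Nat), (((PySem.List.pyRange 0 nb 1).map (fun _ => ([] : List Int)))).getD c [] = [] := by
    intro c
    rw [List.getD_eq_getElem?_getD, List.getElem?_map]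
    cases (PySem.List.pyRange 0 nb 1)[c]? <;> rfl
  rw [List.flatMap_map]
  rw [List.map_flatMap]
  apply List.flatMap_congr
  intro c hc
  rw [hgetD c, List.nil_append]
  rw [List.filter_map, List.filter_map, List.map_map, List.map_map]
  rfl

-- ===== VERDICT (by name: the statement is the Claim_ definition above) =====
theorem fix_unordered_pages_spec : Claim_equal_fix_unordered_pages := by
  intro ordering_rules unordered_pages _
  unfold Spec_fix_unordered_pages fix_unordered_pages fix_unordered_pages_alt
  rw [PySem.List.foldl_append_singleton_eq_map, PySem.List.foldl_append_singleton_eq_map]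
  simp only [List.nil_append]
  exact List.map_congr_left (fun p _ => main_per_page ordering_rules p)
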